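-- pv_equiv track=rewrite | github.com/xlamorlette/challenges | advent_of_code_2023/src/day_14/parabolic_reflector_dish.py | get_spin_cycle
-- ===== SOURCE A (Python) =====
-- from typing import Dict, List, Tuple
--
-- def tilt_north(platform: List[str]) -> List[str]:
--     columns: List[str] = list(map("".join, zip(*platform)))
--     tilted_columns: List[str] = list(map(tilt_line, columns))
--     return list(map("".join, zip(*tilted_columns)))
--
-- def tilt_south(platform: List[str]) -> List[str]:
--     reversed_columns: List[str] = ["".join(column)[::-1] for column in zip(*platform)]
--     tilted_columns: List[str] = ["".join(tilt_line(column)[::-1]) for column in reversed_columns]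
--     return list(map("".join, zip(*tilted_columns)))
--
-- def tilt_east(platform: List[str]) -> List[str]:
--     reversed_lines: List[str] = ["".join(line)[::-1] for line in platform]
--     return ["".join(tilt_line(line))[::-1] for line in reversed_lines]
--
-- def tilt_west(platform: List[str]) -> List[str]:
--     return list(map(tilt_line, platform))
--
-- def tilt_line(line: str) -> str:
--     groups: List[str] = line.split("#")
--     return "#".join(map(stack_rocks_at_the_beginning, groups))
--
-- def stack_rocks_at_the_beginning(group: str) -> str:
--     return "O" * group.count("O") + "." * group.count(".")
--
-- def get_spin_cycle(platform: List[str]) -> Tuple[int, int]: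
--     step: int = 0
--     span_platform: List[str] = platform
--     state = "".join(span_platform)
--     step_by_states: Dict[str, int] = {}
--     while step == 0 or state not in step_by_states:
--         step_by_states[state] = step
--         span_platform = spin(span_platform)
--         state = "".join(span_platform)
--         step += 1
--     return step_by_states[state], step
--
-- def spin(platform: List[str]) -> List[str]:
--     return tilt_east(tilt_south(tilt_west(tilt_north(platform))))
-- ===== SOURCE B (Python) =====
-- from typing import List, Tuple
--
-- # B: works on char grids with a single one-pass row-tilt and one generic,
-- # flag-driven tilt for all four directions; the first repeated state is found
-- # without any state dictionary, by replaying the spin trajectory from the start.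
--
-- def _tilt_row(row: List[str]) -> List[str]:
--     out: List[str] = []
--     rocks = 0
--     dots = 0
--     for c in row:
--         if c == 'O':
--             rocks += 1
--         elif c == '#':
--             out += ['O'] * rocks + ['.'] * dots + ['#']
--             rocks = 0
--             dots = 0
--         elif c == '.':
--             dots += 1
--     return out + ['O'] * rocks + ['.'] * dots
--
-- def _cols(rows: List[List[str]]) -> List[List[str]]:
--     if not rows:
--         return []
--     m = min(map(len, rows))
--     return [[r[i] for r in rows] for i in range(m)]
--
-- def _tilt(g: List[List[str]], transpose: bool, rev: bool) -> List[List[str]]: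
--     rows = _cols(g) if transpose else g
--     if rev:
--         rows = [r[::-1] for r in rows]
--     tilted = [_tilt_row(r) for r in rows]
--     if rev:
--         tilted = [r[::-1] for r in tilted]
--     return _cols(tilted) if transpose else tilted
--
-- def _spin(g: List[List[str]]) -> List[List[str]]:
--     for transpose, rev in ((True, False), (False, False), (True, True), (False, True)):
--         g = _tilt(g, transpose, rev)
--     return g
--
-- def _flat(g: List[List[str]]) -> List[str]:
--     out: List[str] = []
--     for r in g:
--         out += r
--     return out
--
-- def get_spin_cycle(platform: List[str]) -> Tuple[int, int]:
--     grid = [list(r) for r in platform]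
--     k = 0
--     cur = grid
--     while True:
--         cur = _spin(cur)
--         k += 1
--         target = _flat(cur)
--         probe = grid
--         hit = -1
--         j = 0
--         while j < k:
--             if _flat(probe) == target:
--                 hit = j
--                 break
--             probe = _spin(probe)
--             j += 1
--         if hit >= 0:
--             return hit, k
-- ===== Notes on version B (the rewrite author's own statement) =====
-- stated objective: alternative
-- what changed: B reworks both layers: the four direction-specific string-tilt helpers collapse into one flag-driven grid tilt built on a single one-pass row scan (counter accumulator instead of split('#')+count), and the state-to-step dictionary is removed - the first repeated state is detected by replaying the spin trajectory from the start with a nested scan (constant extra space).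
import Mathlib
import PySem

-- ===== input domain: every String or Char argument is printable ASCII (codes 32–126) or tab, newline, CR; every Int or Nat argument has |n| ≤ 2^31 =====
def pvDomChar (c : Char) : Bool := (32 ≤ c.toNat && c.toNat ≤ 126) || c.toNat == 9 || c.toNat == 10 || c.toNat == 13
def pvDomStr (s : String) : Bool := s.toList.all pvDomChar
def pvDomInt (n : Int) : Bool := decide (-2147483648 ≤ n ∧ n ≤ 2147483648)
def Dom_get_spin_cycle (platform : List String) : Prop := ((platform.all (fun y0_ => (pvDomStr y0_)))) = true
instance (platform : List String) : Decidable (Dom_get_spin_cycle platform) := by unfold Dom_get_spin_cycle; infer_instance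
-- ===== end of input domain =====

-- B replaces A's four string-based tilt helpers by one flag-driven grid tilt built on a
-- one-pass row scan, and A's state→step dictionary by dict-free detection that replays
-- the trajectory from the start (alternative decomposition; not faster).

-- ===== PORT A =====

-- stack_rocks_at_the_beginning: "O" * group.count("O") + "." * group.count(".")
def stack_rocks_at_the_beginning (group : String) : String :=
  String.ofList (List.replicate (PySem.Str.count group "O") 'O' ++ List.replicate (PySem.Str.count group ".") '.')

-- tilt_line: "#".join(map(stack_rocks_at_the_beginning, line.split("#")))
def tilt_line (line : String) : String :=
  PySem.Str.join "#" (((PySem.Str.split? line "#").getD []).map stack_rocks_at_the_beginning)  -- split? is some: "#" ≠ ""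

-- hand port of zip(*rows) on lists of code points: truncates every column to the
-- shortest row; exact (the ' ' default is never read since i < minimum length)
def pyZipRows (rows : List (List Char)) : List (List Char) :=
  match rows with
  | [] => []
  | r :: rs =>
      let n := rs.foldl (fun m x => min m x.length) r.length
      (List.range n).map (fun i => (r :: rs).map (fun row => row.getD i ' '))

def tilt_north (platform : List String) : List String :=
  let columns := pyZipRows (platform.map (·.toList))
  let tilted_columns := columns.map (fun c => (tilt_line (String.ofList c)).toList)
  (pyZipRows tilted_columns).map String.ofList

-- column[::-1] is List.reverse (PySem.List.slice?_none_none_neg_one)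
def tilt_south (platform : List String) : List String :=
  let reversed_columns := (pyZipRows (platform.map (·.toList))).map List.reverse
  let tilted_columns := reversed_columns.map (fun c => ((tilt_line (String.ofList c)).toList).reverse)
  (pyZipRows tilted_columns).map String.ofList

def tilt_east (platform : List String) : List String :=
  let reversed_lines := platform.map (fun l => l.toList.reverse)
  reversed_lines.map (fun l => String.ofList ((tilt_line (String.ofList l)).toList).reverse)

def tilt_west (platform : List String) : List String :=
  platform.map tilt_line

def spin (platform : List String) : List String :=
  tilt_east (tilt_south (tilt_west (tilt_north platform)))

-- "".join(platform)
def pvJoin (platform : List String) : String := PySem.Str.join "" platform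

-- fuel guard for the while-loops (a bound never reached: from step 1 on every state is a
-- grid over {O,.,#} of fixed size ≤ len("".join(platform)), so a repeat occurs far earlier)
def pvFuel (platform : List String) : Nat := 3 ^ (pvJoin platform).toList.length + 16

-- A's while loop: step, span_platform, state, step_by_states
def loopA (fuel : Nat) (step : Int) (span : List String) (state : String)
    (d : PySem.Dict String Int) : Int × Int :=
  match fuel with
  | 0 => (0, 0)  -- fuel exhausted: unreachable
  | f + 1 =>
    if step == 0 || !(d.contains state) then
      let d' := d.insert state step
      let span' := spin span
      let state' := pvJoin span'
      loopA f (step + 1) span' state' d'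
    else
      ((d.get? state).getD 0, step)  -- step_by_states[state] (present here), step

def get_spin_cycle (platform : List String) : Int × Int :=
  loopA (pvFuel platform + 1) 0 platform (pvJoin platform) PySem.Dict.empty

-- ===== PORT B =====

-- _tilt_row: one pass over the row with rock/dot counters, flushed at '#' and at the end
def tiltRowB (row : List Char) : List Char :=
  let s := row.foldl (fun (s : List Char × Nat × Nat) c =>
      if c = 'O' then (s.1, s.2.1 + 1, s.2.2)
      else if c = '#' then (s.1 ++ List.replicate s.2.1 'O' ++ List.replicate s.2.2 '.' ++ ['#'], 0, 0)
      else if c = '.' then (s.1, s.2.1, s.2.2 + 1)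
      else s) ([], 0, 0)
  s.1 ++ List.replicate s.2.1 'O' ++ List.replicate s.2.2 '.'

-- _cols: [[r[i] for r in rows] for i in range(min(map(len, rows)))] (r[i] in range: i < min)
def colsB (rows : List (List Char)) : List (List Char) :=
  match rows with
  | [] => []
  | _ :: _ =>
    let m := ((rows.map List.length).min?).getD 0
    (List.range m).map (fun i => rows.map (fun r => r.getD i ' '))

-- _tilt(g, transpose, rev)
def tiltG (g : List (List Char)) (transpose rev : Bool) : List (List Char) :=
  let rows := if transpose then colsB g else g
  let rows' := if rev then rows.map List.reverse else rows
  let tilted := rows'.map tiltRowB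
  let tilted' := if rev then tilted.map List.reverse else tilted
  if transpose then colsB tilted' else tilted'

-- _spin: for (transpose, rev) in ((T,F),(F,F),(T,T),(F,T)): g = _tilt(g, transpose, rev)
def spinG (g : List (List Char)) : List (List Char) :=
  [(true, false), (false, false), (true, true), (false, true)].foldl
    (fun g p => tiltG g p.1 p.2) g

-- _flat: out += r for each row
def flatG (g : List (List Char)) : List Char := g.foldl (fun out r => out ++ r) []

-- B's inner `while j < k` loop (counted down by `remaining` = k - j)
def replayFindB (probe : List (List Char)) (target : List Char) (j : Int) (remaining : Nat) : Int :=
  match remaining with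
  | 0 => -1
  | r + 1 =>
    if flatG probe == target then j
    else replayFindB (spinG probe) target (j + 1) r

-- B's outer `while True` loop
def loopB (fuel : Nat) (k : Int) (cur : List (List Char)) (grid : List (List Char)) : Int × Int :=
  match fuel with
  | 0 => (0, 0)  -- fuel exhausted: unreachable
  | f + 1 =>
    let cur' := spinG cur
    let k' := k + 1
    let target := flatG cur'
    let hit := replayFindB grid target 0 k'.toNat
    if hit ≥ 0 then (hit, k') else loopB f k' cur' grid

def get_spin_cycle_alt (platform : List String) : Int × Int :=
  loopB (pvFuel platform) 0 (platform.map (·.toList)) (platform.map (·.toList))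

-- ===== PRECONDITION & SPEC =====
def Spec_get_spin_cycle (platform : List String) (out : Int × Int) : Prop := out = get_spin_cycle_alt platform
instance (platform : List String) (out : Int × Int) : Decidable (Spec_get_spin_cycle platform out) := by unfold Spec_get_spin_cycle; infer_instance

-- ===== CLAIM (what is proved, stated in full; the proofs are below) =====
def Claim_equal_get_spin_cycle : Prop := ∀ (platform : List String), Dom_get_spin_cycle platform → Spec_get_spin_cycle platform (get_spin_cycle platform)

-- ===== LEMMAS AND PROOFS =====

def toGrid (p : List String) : List (List Char) := p.map String.toList

-- ---- 1. tiltRowB equals A's tilt_line, on the char-list side ----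

-- per-group output of A: "O"*count('O') ++ "."*count('.')
def stk (g : List Char) : List Char :=
  List.replicate (g.count 'O') 'O' ++ List.replicate (g.count '.') '.'

-- recursive shape of B's scan
def tiltRec : List Char → Nat → Nat → List Char
  | [], nO, nD => List.replicate nO 'O' ++ List.replicate nD '.'
  | c :: rest, nO, nD =>
    if c = 'O' then tiltRec rest (nO + 1) nD
    else if c = '#' then
      List.replicate nO 'O' ++ List.replicate nD '.' ++ '#' :: tiltRec rest 0 0
    else if c = '.' then tiltRec rest nO (nD + 1)
    else tiltRec rest nO nD

-- split on a single separator char, recursively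
def splitS (s : Char) : List Char → List (List Char)
  | [] => [[]]
  | c :: rest =>
    match splitS s rest with
    | [] => []  -- unreachable
    | g :: gs => if c = s then [] :: g :: gs else (c :: g) :: gs

lemma splitS_ne_nil (s : Char) (l : List Char) : splitS s l ≠ [] := by
  induction l with
  | nil => simp [splitS]
  | cons c rest ih =>
    cases h : splitS s rest with
    | nil => exact absurd h ih
    | cons g gs => simp only [splitS, h]; split_ifs <;> simp

lemma count_go_singleton (c : Char) :
    ∀ (fuel : Nat) (l : List Char) (acc : Nat), l.length ≤ fuel →
      PySem.Chars.count.go [c] fuel l acc = acc + l.count c := by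
  intro fuel
  induction fuel with
  | zero =>
    intro l acc h
    have : l = [] := by cases l <;> simp_all
    subst this; simp [PySem.Chars.count.go]
  | succ f ih =>
    intro l acc h
    cases l with
    | nil => simp [PySem.Chars.count.go]
    | cons a rest =>
      by_cases hc : a = c
      · subst hc
        have hp : [a].isPrefixOf (a :: rest) = true := by simp [List.isPrefixOf]
        simp only [PySem.Chars.count.go, hp, if_true, List.length_singleton, List.drop_one,
          List.tail_cons]
        rw [ih rest (acc + 1) (by simpa using h)]
        simp
        omega
      · have hp : [c].isPrefixOf (a :: rest) = false := by
          simp [List.isPrefixOf]; exact fun hh => hc hh.symm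
        simp only [PySem.Chars.count.go, hp]
        rw [ih rest acc (by simpa using h)]
        simp [hc]

lemma count_singleton (c : Char) (l : List Char) :
    PySem.Chars.count l [c] = l.count c := by
  have h : ([c] : List Char).isEmpty = false := by simp
  simp only [PySem.Chars.count, h]
  simpa using count_go_singleton c l.length l 0 (le_refl _)

lemma splitOn_go_singleton (s : Char) :
    ∀ (fuel : Nat) (l cur : List Char) (acc : List (List Char)), l.length < fuel →
      PySem.Chars.splitOn.go [s] fuel l cur acc =
        acc.reverse ++ (match splitS s l with
          | [] => []
          | g :: gs => (cur.reverse ++ g) :: gs) := by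
  intro fuel
  induction fuel with
  | zero => intro l cur acc h; omega
  | succ f ih =>
    intro l cur acc h
    cases l with
    | nil => simp [PySem.Chars.splitOn.go, splitS]
    | cons c rest =>
      by_cases hc : c = s
      · subst hc
        have hp : [c].isPrefixOf (c :: rest) = true := by simp [List.isPrefixOf]
        simp only [PySem.Chars.splitOn.go, hp, if_true, List.length_singleton, List.drop_one,
          List.tail_cons]
        rw [ih rest [] (cur.reverse :: acc) (by simpa using h)]
        cases hs : splitS c rest with
        | nil => exact absurd hs (splitS_ne_nil c rest)
        | cons g gs => simp [splitS, hs]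
      · have hp : [s].isPrefixOf (c :: rest) = false := by
          simp [List.isPrefixOf]; exact fun hh => hc hh.symm
        simp only [PySem.Chars.splitOn.go, hp]
        rw [ih rest (c :: cur) acc (by simpa using h)]
        cases hs : splitS s rest with
        | nil => exact absurd hs (splitS_ne_nil s rest)
        | cons g gs => simp [splitS, hs, hc]

lemma splitOn_singleton (s : Char) (l : List Char) :
    PySem.Chars.splitOn l [s] = splitS s l := by
  unfold PySem.Chars.splitOn
  rw [splitOn_go_singleton s (l.length + 1) l [] [] (by omega)]
  cases hs : splitS s l with
  | nil => exact absurd hs (splitS_ne_nil s l)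
  | cons g gs => simp

-- join of stk over the tail groups, '#'-separated
def tailJoin (gs : List (List Char)) : List Char := gs.flatMap (fun g => '#' :: stk g)

lemma tiltRec_eq (l : List Char) : ∀ (nO nD : Nat),
    tiltRec l nO nD =
      (match splitS '#' l with
       | [] => []
       | g :: gs =>
         List.replicate (nO + g.count 'O') 'O' ++ List.replicate (nD + g.count '.') '.'
           ++ tailJoin gs) := by
  induction l with
  | nil => intro nO nD; simp [tiltRec, splitS, tailJoin]
  | cons c rest ih =>
    intro nO nD
    cases hs : splitS '#' rest with
    | nil => exact absurd hs (splitS_ne_nil '#' rest)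
    | cons g gs =>
      by_cases hO : c = 'O'
      · subst hO
        have e1 : ('O' : Char) ≠ '#' := by decide
        simp only [tiltRec, if_pos rfl, ih, hs, splitS, if_neg e1]
        simp [Nat.add_comm, Nat.add_left_comm]
      · by_cases hH : c = '#'
        · subst hH
          have e1 : ('#' : Char) ≠ 'O' := by decide
          simp only [tiltRec, if_neg e1, if_pos rfl, ih, hs, splitS]
          simp [tailJoin, stk]
        · by_cases hD : c = '.'
          · subst hD
            have e1 : ('.' : Char) ≠ 'O' := by decide
            have e2 : ('.' : Char) ≠ '#' := by decide
            simp only [tiltRec, if_neg e1, if_neg e2, if_pos rfl, ih, hs, splitS]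
            simp [Nat.add_comm, Nat.add_left_comm]
          · simp only [tiltRec, if_neg hO, if_neg hH, if_neg hD, ih, hs, splitS]
            simp [hO, hD]

lemma join_stk (g : List Char) (gs : List (List Char)) :
    PySem.Chars.join ['#'] ((g :: gs).map stk) = stk g ++ tailJoin gs := by
  induction gs generalizing g with
  | nil => simp [PySem.Chars.join_singleton, tailJoin]
  | cons h t ih =>
    simp only [List.map_cons, PySem.Chars.join_cons_cons]
    have := ih h
    simp only [List.map_cons] at this
    rw [this]
    simp [tailJoin]

lemma foldl_tilt (l : List Char) : ∀ (out : List Char) (nO nD : Nat),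
    (let s := l.foldl (fun (s : List Char × Nat × Nat) c =>
      if c = 'O' then (s.1, s.2.1 + 1, s.2.2)
      else if c = '#' then (s.1 ++ List.replicate s.2.1 'O' ++ List.replicate s.2.2 '.' ++ ['#'], 0, 0)
      else if c = '.' then (s.1, s.2.1, s.2.2 + 1)
      else s) (out, nO, nD)
     s.1 ++ List.replicate s.2.1 'O' ++ List.replicate s.2.2 '.') = out ++ tiltRec l nO nD := by
  induction l with
  | nil => intro out nO nD; simp [tiltRec]
  | cons c rest ih =>
    intro out nO nD
    by_cases hO : c = 'O'
    · subst hO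
      simp only [List.foldl_cons, if_pos rfl]
      exact (ih out (nO + 1) nD).trans (by rw [tiltRec, if_pos rfl])
    · by_cases hH : c = '#'
      · subst hH
        have e1 : ('#' : Char) ≠ 'O' := by decide
        simp only [List.foldl_cons, if_neg e1, if_pos rfl]
        refine (ih _ 0 0).trans ?_
        rw [tiltRec, if_neg e1, if_pos rfl]
        simp
      · by_cases hD : c = '.'
        · subst hD
          have e1 : ('.' : Char) ≠ 'O' := by decide
          have e2 : ('.' : Char) ≠ '#' := by decide
          simp only [List.foldl_cons, if_neg e1, if_neg e2, if_pos rfl]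
          exact (ih out nO (nD + 1)).trans (by rw [tiltRec, if_neg e1, if_neg e2, if_pos rfl])
        · simp only [List.foldl_cons, if_neg hO, if_neg hH, if_neg hD]
          exact (ih out nO nD).trans (by rw [tiltRec, if_neg hO, if_neg hH, if_neg hD])

lemma stack_rocks_toList (g : List Char) :
    (stack_rocks_at_the_beginning (String.ofList g)).toList = stk g := by
  simp [stack_rocks_at_the_beginning, stk, PySem.Str.count, count_singleton]

lemma tilt_line_toList (l : List Char) :
    (tilt_line (String.ofList l)).toList = tiltRec l 0 0 := by
  have hsplit : PySem.Str.split? (String.ofList l) "#"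
      = some ((splitS '#' l).map String.ofList) := by
    simp [PySem.Str.split?, PySem.Chars.split?, splitOn_singleton]
  rw [tilt_line, hsplit]
  cases hs : splitS '#' l with
  | nil => exact absurd hs (splitS_ne_nil '#' l)
  | cons g gs =>
    rw [tiltRec_eq l 0 0, hs]
    simp only [Option.getD_some, List.map_map, PySem.Str.join]
    rw [String.toList_ofList]
    have hmap : ((g :: gs).map (stack_rocks_at_the_beginning ∘ String.ofList)).map String.toList
        = (g :: gs).map stk := by
      simp only [List.map_map]
      exact List.map_congr_left (fun x _ => stack_rocks_toList x)
    simp only [List.map_map] at hmap ⊢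
    rw [hmap]
    have h9 : ("#" : String).toList = ['#'] := rfl
    rw [h9, join_stk]
    simp [stk]

lemma tiltRowB_eq (l : List Char) :
    tiltRowB l = (tilt_line (String.ofList l)).toList := by
  rw [tilt_line_toList]
  have := foldl_tilt l [] 0 0
  simpa [tiltRowB] using this

lemma tiltRowB_eq' (s : String) : tiltRowB s.toList = (tilt_line s).toList := by
  rw [tiltRowB_eq, String.ofList_toList]

-- ---- 2. colsB equals pyZipRows ----

lemma colsB_eq (rows : List (List Char)) : colsB rows = pyZipRows rows := by
  cases rows with
  | nil => rfl
  | cons r rs =>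
    simp only [colsB, pyZipRows, List.map_cons, List.min?_cons', Option.getD_some]
    rw [List.foldl_map]

-- ---- 3. spinG on grids equals spin on string lists ----

lemma tiltG_north (p : List String) : tiltG (toGrid p) true false = toGrid (tilt_north p) := by
  simp only [tiltG, if_true, Bool.false_eq_true, if_false, colsB_eq]
  unfold tilt_north toGrid
  simp only [List.map_map]
  rw [List.map_congr_left (fun c (_ : c ∈ pyZipRows (List.map String.toList p)) => tiltRowB_eq c)]
  simp only [Function.comp_def, String.toList_ofList, List.map_id']

lemma tiltG_west (p : List String) : tiltG (toGrid p) false false = toGrid (tilt_west p) := by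
  simp only [tiltG, Bool.false_eq_true, if_false]
  unfold tilt_west toGrid
  simp only [List.map_map]
  exact List.map_congr_left (fun s _ => tiltRowB_eq' s)

lemma tiltG_south (p : List String) : tiltG (toGrid p) true true = toGrid (tilt_south p) := by
  simp only [tiltG, if_true, colsB_eq]
  unfold tilt_south toGrid
  simp only [List.map_map]
  rw [List.map_congr_left
    (fun c (_ : c ∈ pyZipRows (List.map String.toList p)) =>
      (by simp [Function.comp, tiltRowB_eq] :
        (List.reverse ∘ tiltRowB ∘ List.reverse) c
          = ((fun c => (tilt_line (String.ofList c)).toList.reverse) ∘ List.reverse) c))]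
  simp only [Function.comp_def, String.toList_ofList, List.map_id']

lemma tiltG_east (p : List String) : tiltG (toGrid p) false true = toGrid (tilt_east p) := by
  simp only [tiltG, if_true, Bool.false_eq_true, if_false]
  unfold tilt_east toGrid
  simp only [List.map_map]
  exact List.map_congr_left (fun s _ => by
    simp [Function.comp, tiltRowB_eq, String.toList_ofList])

lemma spinG_toGrid (p : List String) : spinG (toGrid p) = toGrid (spin p) := by
  simp only [spinG, List.foldl_cons, List.foldl_nil]
  rw [tiltG_north p, tiltG_west (tilt_north p), tiltG_south (tilt_west (tilt_north p)),
    tiltG_east (tilt_south (tilt_west (tilt_north p)))]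
  rfl

lemma spinG_iterate (p : List String) (k : Nat) :
    spinG^[k] (toGrid p) = toGrid (spin^[k] p) := by
  induction k with
  | zero => rfl
  | succ k ih =>
    rw [Function.iterate_succ_apply', Function.iterate_succ_apply', ih, spinG_toGrid]

lemma join_nil_flatten (l : List (List Char)) : PySem.Chars.join [] l = l.flatten := by
  induction l with
  | nil => simp [PySem.Chars.join_nil]
  | cons a t ih =>
    cases t with
    | nil => simp [PySem.Chars.join_singleton]
    | cons b r => simp_all [PySem.Chars.join_cons_cons]

lemma flatG_aux (g : List (List Char)) :
    ∀ acc, g.foldl (fun out r => out ++ r) acc = acc ++ g.flatten := by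
  induction g with
  | nil => simp
  | cons r rs ih => intro acc; simp [ih, List.flatten_cons]

lemma flatG_toGrid (q : List String) : flatG (toGrid q) = (pvJoin q).toList := by
  rw [toGrid, flatG, flatG_aux]
  simp [pvJoin, PySem.Str.join, join_nil_flatten]

-- ---- 4. the two loops agree ----

-- the lookup A's dict holds at loop entry k: first j < k with spin^[j] p joining to target
def lookupSpec (p : List String) (target : String) (k : Nat) : Option Int :=
  if replayFindB (toGrid p) target.toList 0 k ≥ 0
  then some (replayFindB (toGrid p) target.toList 0 k) else none

lemma replayFindB_succ (target : List Char) :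
    ∀ (r : Nat) (probe : List (List Char)) (j : Int), 0 ≤ j →
      replayFindB probe target j (r + 1) =
        if replayFindB probe target j r ≥ 0 then replayFindB probe target j r
        else if flatG (spinG^[r] probe) == target then j + r else -1 := by
  intro r
  induction r with
  | zero =>
    intro probe j hj
    by_cases h : flatG probe == target <;>
      simp [replayFindB, h] <;> omega
  | succ r ih =>
    intro probe j hj
    by_cases h : flatG probe == target
    · have hge : (0:Int) ≤ j := hj
      simp [replayFindB, h, hge]
    · have := ih (spinG probe) (j + 1) (by omega)
      simp only [replayFindB, h, if_false, Bool.false_eq_true, ite_false] at *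
      rw [this]
      rw [Function.iterate_succ_apply]
      have : j + (↑(r + 1) : Int) = (j + 1) + ↑r := by push_cast; ring
      rw [this]

lemma loop_eq (p : List String) :
    ∀ (f : Nat) (k : Nat) (d : PySem.Dict String Int), 1 ≤ k →
      (∀ target, d.get? target = lookupSpec p target k) →
      loopA f (k : Int) (spin^[k] p) (pvJoin (spin^[k] p)) d
        = loopB f ((k : Int) - 1) (spinG^[k - 1] (toGrid p)) (toGrid p) := by
  intro f
  induction f with
  | zero => intro k d hk hd; rfl
  | succ f ih =>
    intro k d hk hd
    have hk0 : ((k : Int) == 0) = false := by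
      simp [Int.natCast_eq_zero]; omega
    have hiterG : spinG (spinG^[k - 1] (toGrid p)) = spinG^[k] (toGrid p) := by
      conv_rhs => rw [show k = (k - 1) + 1 by omega]
      rw [Function.iterate_succ_apply']
    have htoNat : ((k : Int) - 1 + 1).toNat = k := by omega
    set state := pvJoin (spin^[k] p) with hstate
    have hflat : flatG (spinG^[k] (toGrid p)) = state.toList := by
      rw [spinG_iterate, flatG_toGrid]
    have hget := hd state
    by_cases hR : replayFindB (toGrid p) state.toList 0 k ≥ 0
    · -- the state has been seen: both loops return (first index, k)
      have hsome : d.get? state = some (replayFindB (toGrid p) state.toList 0 k) := by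
        rw [hget]; simp [lookupSpec, hR]
      simp only [loopA, loopB, hk0, Bool.false_or, hsome, PySem.Dict.contains_eq_isSome_get?,
        Option.isSome_some, Bool.not_true, hiterG, htoNat, hflat]
      simp [hR, sub_add_cancel]
    · -- fresh state: both loops advance; apply the induction hypothesis at k + 1
      have hnone : d.get? state = none := by
        rw [hget]; simp [lookupSpec, hR]
      have hd' : ∀ target, (d.insert state (k : Int)).get? target = lookupSpec p target (k + 1) := by
        intro t
        rw [PySem.Dict.get?_insert]
        unfold lookupSpec
        rw [replayFindB_succ t.toList k (toGrid p) 0 (le_refl 0)]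
        by_cases ht : t = state
        · have hbeq : (flatG (spinG^[k] (toGrid p)) == t.toList) = true := by
            rw [hflat, ht]; simp
          simp [ht, hR, hbeq, hflat, Int.natCast_nonneg]
        · have hbeq : (flatG (spinG^[k] (toGrid p)) == t.toList) = false := by
            rw [hflat, beq_eq_false_iff_ne]
            exact fun h => ht (String.toList_inj.mp h).symm
          have htb : (state == t) = false := by
            rw [beq_eq_false_iff_ne]; exact fun h => ht h.symm
          have := hd t
          unfold lookupSpec at this
          by_cases hRt : replayFindB (toGrid p) t.toList 0 k ≥ 0
          · simp [ht, htb, hRt, this]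
          · simp [ht, htb, hRt, hbeq, this]
      have hmain := ih (k + 1) (d.insert state (k : Int)) (by omega) hd'
      have e1 : ((k + 1 : Nat) : Int) = (k : Int) + 1 := by push_cast; ring
      have e2 : spin^[k + 1] p = spin (spin^[k] p) := Function.iterate_succ_apply' spin k p
      have e3 : (k + 1) - 1 = k := by omega
      rw [e1, e2, e3] at hmain
      simp only [loopA, loopB, hk0, Bool.false_or, PySem.Dict.contains_eq_isSome_get?, hnone,
        Option.isSome_none, Bool.not_false, if_true, hiterG, htoNat, hflat]
      simp only [sub_add_cancel]
      rw [hmain]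
      simp [hR]

theorem get_spin_cycle_spec : Claim_equal_get_spin_cycle := by
  intro p _hdom
  unfold Spec_get_spin_cycle get_spin_cycle get_spin_cycle_alt
  have hstep0 : loopA (pvFuel p + 1) 0 p (pvJoin p) PySem.Dict.empty
      = loopA (pvFuel p) 1 (spin p) (pvJoin (spin p)) (PySem.Dict.empty.insert (pvJoin p) 0) := by
    simp [loopA]
  rw [hstep0]
  have hd1 : ∀ target, ((PySem.Dict.empty (κ := String) (ν := Int)).insert (pvJoin p) 0).get? target
      = lookupSpec p target 1 := by
    intro t
    rw [PySem.Dict.get?_insert]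
    unfold lookupSpec replayFindB replayFindB
    by_cases ht : t = pvJoin p
    · have h1 : flatG (toGrid p) == t.toList := by
        rw [ht, flatG_toGrid]; simp
      have h2 : (pvJoin p == t) = true := by simp [ht]
      simp [ht, h1, h2, flatG_toGrid, Int.natCast_nonneg]
    · have hbeq : (pvJoin p == t) = false := by
        rw [beq_eq_false_iff_ne]; exact fun h => ht h.symm
      have h1 : (flatG (toGrid p) == t.toList) = false := by
        rw [flatG_toGrid, beq_eq_false_iff_ne]
        exact fun h => ht (String.toList_inj.mp h).symm
      simp [ht, hbeq, h1, PySem.Dict.get?_empty]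
  have := loop_eq p (pvFuel p) 1 (PySem.Dict.empty.insert (pvJoin p) 0) (le_refl 1) hd1
  simp only [Function.iterate_one, Nat.cast_one, sub_self] at this
  rw [this]
  simp [toGrid]
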